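-- pv_equiv track=rewrite | github.com/Cato-Wen/Cato-Wen-Skill | skills/wonder-context-finder/scripts/extract_ms_cards.py | create_card_index
-- ===== SOURCE A (Python) =====
-- def create_card_index(cards: dict) -> str:
--     """Create an index markdown file for all MS Cards."""
--     index_content = """# MS Cards Index
--
-- This index lists all MS Cards extracted from the Master Data V2.0 Use Cases documents.
--
-- ## Overview
--
-- MS Cards document business requirements in the format `MSxx-yy`:
-- - **MS05 series**: Item detail UI cards
-- - **MS06 series**: BOM and component operations
-- - **MS08 series**: Major operations
-- - **MS13 series**: Complex features
-- - **MS15 series**: Additional operations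
--
-- ## Cards by Series
--
-- """
--
--     # Group cards by series
--     series_groups = {}
--     for card_id in sorted(cards.keys()):
--         series = card_id[:4]  # MS05, MS06, etc.
--         if series not in series_groups:
--             series_groups[series] = []
--         series_groups[series].append(card_id)
--
--     for series in sorted(series_groups.keys()):
--         index_content += f"### {series} Series\n\n"
--         for card_id in sorted(series_groups[series]):
--             card_info = cards[card_id]
--             title = card_info.get('title', 'Unknown')
--             index_content += f"- [{card_id}](cards/{card_id}.md) - {title}\n"
--         index_content += "\n"
--
--     return index_content
-- ===== SOURCE B (Python) =====
-- from itertools import groupby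
--
-- HEADER = """# MS Cards Index
--
-- This index lists all MS Cards extracted from the Master Data V2.0 Use Cases documents.
--
-- ## Overview
--
-- MS Cards document business requirements in the format `MSxx-yy`:
-- - **MS05 series**: Item detail UI cards
-- - **MS06 series**: BOM and component operations
-- - **MS08 series**: Major operations
-- - **MS13 series**: Complex features
-- - **MS15 series**: Additional operations
--
-- ## Cards by Series
--
-- """
--
--
-- def create_card_index(cards: dict) -> str:
--     """Create an index markdown file for all MS Cards (groupby over the sorted keys)."""
--     parts = [HEADER]
--     for series, group in groupby(sorted(cards), key=lambda cid: cid[:4]):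
--         parts.append(f"### {series} Series\n\n")
--         for card_id in group:
--             title = cards[card_id].get('title', 'Unknown')
--             parts.append(f"- [{card_id}](cards/{card_id}.md) - {title}\n")
--         parts.append("\n")
--     return "".join(parts)
-- ===== Notes on version B (the rewrite author's own statement) =====
-- stated objective: idiomatic
-- what changed: Drops the grouping dict and the per-group re-sorts: B sorts the keys once, splits them into contiguous same-prefix runs with itertools.groupby, emits each section in a single pass and joins the collected parts at the end.
import Mathlib
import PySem

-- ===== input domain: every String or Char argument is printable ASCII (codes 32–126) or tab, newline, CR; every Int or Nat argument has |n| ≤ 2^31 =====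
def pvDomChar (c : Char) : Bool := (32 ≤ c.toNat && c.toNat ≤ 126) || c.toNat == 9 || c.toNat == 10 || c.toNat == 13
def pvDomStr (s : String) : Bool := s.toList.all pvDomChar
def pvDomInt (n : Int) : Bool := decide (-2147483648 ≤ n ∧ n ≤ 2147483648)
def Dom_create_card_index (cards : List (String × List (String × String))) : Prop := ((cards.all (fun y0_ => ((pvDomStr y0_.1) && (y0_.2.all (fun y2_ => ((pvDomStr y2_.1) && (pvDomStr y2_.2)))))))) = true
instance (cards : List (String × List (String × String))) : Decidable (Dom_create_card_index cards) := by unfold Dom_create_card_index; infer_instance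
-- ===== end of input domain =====

-- B replaces A's grouping dict and per-group re-sorts by one groupby-style pass over the once-sorted keys (idiomatic decomposition; same asymptotic cost).


-- the verbatim header literal both Pythons start from
def pvHeader : String := "# MS Cards Index\n\nThis index lists all MS Cards extracted from the Master Data V2.0 Use Cases documents.\n\n## Overview\n\nMS Cards document business requirements in the format `MSxx-yy`:\n- **MS05 series**: Item detail UI cards\n- **MS06 series**: BOM and component operations\n- **MS08 series**: Major operations\n- **MS13 series**: Complex features\n- **MS15 series**: Additional operations\n\n## Cards by Series\n\n"

-- ===== PORT A =====
-- sorted(cards.keys()): dict keys = first occurrences (PySem.List.dedup); cards[card_id] = first-match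
-- lookup (PySem.Dict.mk, exact per the dict-as-assoc-list convention); the 'if series not in …: … = []'
-- + append pair of lines is exactly d[series] = d.get(series, []) + [card_id], i.e. Dict.modify.
def create_card_index (cards : List (String × List (String × String))) : String :=
  let sortedKeys := PySem.List.sorted (PySem.List.dedup (cards.map Prod.fst)) (fun x => x) false
  let series_groups : PySem.Dict String (List String) :=
    sortedKeys.foldl (fun g card_id =>
      g.modify (PySem.Str.slice card_id none (some 4)) [] (fun xs => xs ++ [card_id])) PySem.Dict.empty
  (PySem.List.sorted series_groups.keys (fun x => x) false).foldl (fun index_content series =>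
    let index_content := index_content ++ "### " ++ series ++ " Series\n\n"
    let index_content := (PySem.List.sorted (series_groups.getD series []) (fun x => x) false).foldl
      (fun index_content card_id =>
        let card_info := ((PySem.Dict.mk cards).get? card_id).getD []
        let title := (PySem.Dict.mk card_info).getD "title" "Unknown"
        index_content ++ "- [" ++ card_id ++ "](cards/" ++ card_id ++ ".md) - " ++ title ++ "\n")
      index_content
    index_content ++ "\n") pvHeader

-- ===== PORT B =====
-- itertools.groupby over the sorted keys: each run of equal 4-char prefixes becomes one section;
-- parts are collected in a list and joined once at the end, as Source B does.
def pvGroupbyParts (cards : List (String × List (String × String))) : List String → List String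
  | [] => []
  | card_id :: rest =>
    let series := PySem.Str.slice card_id none (some 4)
    let group := card_id :: rest.takeWhile (fun j => PySem.Str.slice j none (some 4) == series)
    (("### " ++ series ++ " Series\n\n")
        :: group.map (fun cid =>
            "- [" ++ cid ++ "](cards/" ++ cid ++ ".md) - "
              ++ (PySem.Dict.mk (((PySem.Dict.mk cards).get? cid).getD [])).getD "title" "Unknown" ++ "\n")
        ++ ["\n"])
      ++ pvGroupbyParts cards (rest.dropWhile (fun j => PySem.Str.slice j none (some 4) == series))
termination_by l => l.length
decreasing_by
  simp only [List.length_cons]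
  exact Nat.lt_succ_of_le (List.length_dropWhile_le _ _)

def create_card_index_alt (cards : List (String × List (String × String))) : String :=
  PySem.Str.join ""
    (pvHeader :: pvGroupbyParts cards (PySem.List.sorted (PySem.List.dedup (cards.map Prod.fst)) (fun x => x) false))

-- ===== PRECONDITION & SPEC =====
def Spec_create_card_index (cards : List (String × List (String × String))) (out : String) : Prop := out = create_card_index_alt cards
instance (cards : List (String × List (String × String))) (out : String) : Decidable (Spec_create_card_index cards out) := by unfold Spec_create_card_index; infer_instance

-- ===== CLAIM (what is proved, stated in full; the proofs are below) =====
def Claim_equal_create_card_index : Prop := ∀ (cards : List (String × List (String × String))), Dom_create_card_index cards → Spec_create_card_index cards (create_card_index cards)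

-- ===== LEMMAS AND PROOFS =====


-- ---- join lemmas
theorem pvJoinNilFlatten (pss : List (List Char)) : PySem.Chars.join [] pss = pss.flatten := by
  induction pss with
  | nil => rfl
  | cons p ps ih => cases ps <;> simp_all [PySem.Chars.join, List.intercalate]

theorem pvSJoinNil : PySem.Str.join "" ([] : List String) = "" := rfl

theorem pvSJoinCons (p : String) (ps : List String) :
    PySem.Str.join "" (p :: ps) = p ++ PySem.Str.join "" ps := by
  apply String.toList_inj.mp
  simp [PySem.Str.toList_join, pvJoinNilFlatten]

theorem pvSJoinAppend (a b : List String) :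
    PySem.Str.join "" (a ++ b) = PySem.Str.join "" a ++ PySem.Str.join "" b := by
  apply String.toList_inj.mp
  simp [PySem.Str.toList_join, pvJoinNilFlatten]

-- ---- lex-take monotonicity
theorem pvNilLe (l : List Char) : ([] : List Char) ≤ l := by
  cases l with
  | nil => exact le_refl _
  | cons x xs => exact le_of_lt (List.Lex.nil)

theorem pvLexTake {a b : List Char} (h : a < b) : ∀ n : Nat, a.take n ≤ b.take n := by
  replace h : List.Lex (· < ·) a b := h
  induction h with
  | nil => intro n; simp only [List.take_nil]; exact pvNilLe _
  | @cons x l1 l2 _ ih =>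
    intro n
    cases n with
    | zero => exact le_refl _
    | succ n => exact List.cons_le_cons x (ih n)
  | @rel x y l1 l2 hxy =>
    intro n
    cases n with
    | zero => exact le_refl _
    | succ n => exact le_of_lt (List.Lex.rel hxy)

theorem pvTakeLe {a b : List Char} (h : a ≤ b) (n : Nat) : a.take n ≤ b.take n := by
  rcases lt_or_eq_of_le h with hlt | rfl
  · exact pvLexTake hlt n
  · exact le_refl _

def pvPre (k : String) : String := PySem.Str.slice k none (some 4)

theorem pvPre_toList (k : String) : (pvPre k).toList = k.toList.take 4 := by
  simp [pvPre, PySem.Str.toList_slice, PySem.Chars.slice_eq_listSlice,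
    PySem.List.slice_to (xs := k.toList) (b := (4:Int)) (by norm_num)]

theorem pvPre_mono {s t : String} (h : s ≤ t) : pvPre s ≤ pvPre t := by
  rw [String.le_iff_toList_le] at h ⊢
  rw [pvPre_toList, pvPre_toList]
  exact pvTakeLe h 4

-- ---- Set.add fold lemmas
theorem pvFoldlAddNoop (xs : List String) : ∀ s : PySem.Set String, (∀ j ∈ xs, j ∈ s) →
    List.foldl PySem.Set.add s xs = s := by
  induction xs with
  | nil => intro s _; rfl
  | cons x xs ih =>
    intro s h
    have : PySem.Set.add s x = s := by
      simp [PySem.Set.add, PySem.Set.contains, List.contains_eq_mem, h x (by simp)]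
    rw [List.foldl_cons, this]
    exact ih s (fun j hj => h j (by simp [hj]))

theorem pvFoldlAddCons (ys : List String) : ∀ (s : PySem.Set String) (x : String), x ∉ ys →
    List.foldl PySem.Set.add (x :: s) ys = x :: List.foldl PySem.Set.add s ys := by
  induction ys with
  | nil => intro s x _; rfl
  | cons y ys ih =>
    intro s x hx
    have hstep : PySem.Set.add (x :: s) y = x :: PySem.Set.add s y := by
      by_cases hm : y ∈ s
      · simp [PySem.Set.add, PySem.Set.contains, List.contains_eq_mem, hm]
      · have hyx : y ≠ x := fun e => hx (e ▸ by simp)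
        simp [PySem.Set.add, PySem.Set.contains, List.contains_eq_mem, hm, hyx]
    rw [List.foldl_cons, hstep, List.foldl_cons]
    exact ih _ x (fun h => hx (by simp [h]))

theorem pvDedupConsEq (x : String) (xs ys : List String)
    (h1 : ∀ j ∈ xs, j = x) (h2 : x ∉ ys) :
    PySem.List.dedup (x :: (xs ++ ys)) = x :: PySem.List.dedup ys := by
  show PySem.Set.ofList _ = _
  unfold PySem.Set.ofList
  rw [List.foldl_cons]
  have hx : PySem.Set.add PySem.Set.empty x = [x] := rfl
  rw [hx, List.foldl_append]
  have : List.foldl PySem.Set.add [x] xs = [x] := by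
    apply pvFoldlAddNoop
    intro j hj; simp [h1 j hj]
  rw [this]
  show List.foldl PySem.Set.add (x :: PySem.Set.empty) ys = _
  rw [pvFoldlAddCons ys PySem.Set.empty x h2]
  rfl

-- sublist
theorem pvFoldlAddSublist (xs : List String) : ∀ s : PySem.Set String,
    ∃ t, List.foldl PySem.Set.add s xs = s ++ t ∧ t.Sublist xs := by
  induction xs with
  | nil => intro s; exact ⟨[], by simp⟩
  | cons x xs ih =>
    intro s
    by_cases hc : PySem.Set.contains s x
    · have hstep : PySem.Set.add s x = s := by simp [PySem.Set.add, PySem.Set.contains] at hc ⊢; simp [hc]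
      obtain ⟨t, ht, hs⟩ := ih s
      exact ⟨t, by rw [List.foldl_cons, hstep]; exact ht, hs.cons x⟩
    · have hstep : PySem.Set.add s x = s ++ [x] := by simp [PySem.Set.add, PySem.Set.contains] at hc ⊢; simp [hc]
      obtain ⟨t, ht, hs⟩ := ih (s ++ [x])
      exact ⟨x :: t, by rw [List.foldl_cons, hstep, ht, List.append_assoc]; rfl,
        hs.cons₂ x⟩

theorem pvDedupSublist (xs : List String) : (PySem.List.dedup xs).Sublist xs := by
  show (PySem.Set.ofList xs).Sublist xs
  obtain ⟨t, ht, hs⟩ := pvFoldlAddSublist xs PySem.Set.empty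
  unfold PySem.Set.ofList
  rw [ht]; exact hs

-- string foldl-append lemma
theorem pvFoldlLine (f : String → String) (run : List String) : ∀ X : String,
    run.foldl (fun a k => a ++ f k) X = X ++ PySem.Str.join "" (run.map f) := by
  induction run with
  | nil => intro X; simp [pvSJoinNil]
  | cons r rs ih =>
    intro X
    rw [List.foldl_cons, ih, List.map_cons, pvSJoinCons, ← String.append_assoc]

def pvHdr (s : String) : String := "### " ++ s ++ " Series\n\n"
def pvLine (cards : List (String × List (String × String))) (cid : String) : String :=
  "- [" ++ cid ++ "](cards/" ++ cid ++ ".md) - "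
    ++ (PySem.Dict.mk (((PySem.Dict.mk cards).get? cid).getD [])).getD "title" "Unknown" ++ "\n"

theorem pvGroupsGetD (l : List String) (s : String) :
    (l.foldl (fun g k => g.modify (pvPre k) [] (fun xs => xs ++ [k])) PySem.Dict.empty).getD s []
      = l.filter (fun k => pvPre k == s) := by
  have h := PySem.Dict.getD_foldl_modify_append (l.map (fun k => (pvPre k, k))) PySem.Dict.empty s
  rw [List.foldl_map] at h
  rw [h]
  simp [List.filter_map, List.map_map, Function.comp_def]

theorem pvGroupsKeys (l : List String) :
    (l.foldl (fun g k => g.modify (pvPre k) [] (fun xs => xs ++ [k])) PySem.Dict.empty).keys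
      = PySem.List.dedup (l.map pvPre) := by
  have h := PySem.Dict.keys_foldl_modify_key l pvPre [] (fun _ k => fun xs => xs ++ [k]) PySem.Dict.empty
  simpa [PySem.Dict.keys_empty, PySem.Set.update_nil_left] using h

theorem pvDropHeadFalse (p : String → Bool) (l : List String) (d : String) (ds : List String)
    (h : l.dropWhile p = d :: ds) : p d = false := by
  have h2 := List.head?_dropWhile_not p l
  rw [h] at h2
  simpa using h2

theorem pvMain (cards : List (String × List (String × String))) :
    ∀ (n : Nat) (l : List String), l.length ≤ n → l.Pairwise (· ≤ ·) → ∀ acc : String,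
    List.foldl (fun acc s =>
        (List.foldl (fun a k => a ++ pvLine cards k) (acc ++ pvHdr s)
          (l.filter (fun k => pvPre k == s))) ++ "\n")
      acc (PySem.List.dedup (l.map pvPre))
      = acc ++ PySem.Str.join "" (pvGroupbyParts cards l) := by
  intro n
  induction n with
  | zero =>
    intro l hlen _ acc
    have : l = [] := List.eq_nil_of_length_eq_zero (Nat.le_zero.mp hlen)
    subst this
    simp [pvGroupbyParts, PySem.List.dedup, PySem.Set.ofList, pvSJoinNil]
  | succ m ih =>
    intro l hlen hpw acc
    match l with
    | [] => simp [pvGroupbyParts, PySem.List.dedup, PySem.Set.ofList, pvSJoinNil]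
    | k :: rest =>
      have hk_le : ∀ y ∈ rest, k ≤ y := (List.pairwise_cons.mp hpw).1
      have h_rest_pw : rest.Pairwise (· ≤ ·) := (List.pairwise_cons.mp hpw).2
      set p : String → Bool := fun j => PySem.Str.slice j none (some 4) == PySem.Str.slice k none (some 4) with hp
      have hp' : ∀ j, p j = (pvPre j == pvPre k) := fun j => rfl
      set tw := rest.takeWhile p with htw
      set dw := rest.dropWhile p with hdw
      have h_tw_eq : ∀ j ∈ tw, pvPre j = pvPre k := by
        intro j hj
        have := List.mem_takeWhile_imp hj
        rw [hp'] at this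
        exact eq_of_beq this
      have h_dw_sub : dw.Sublist rest := List.dropWhile_sublist p
      have h_dw_pw : dw.Pairwise (· ≤ ·) := List.Pairwise.sublist h_dw_sub h_rest_pw
      have h_dw_lt : ∀ y ∈ dw, pvPre k < pvPre y := by
        match hdq : dw with
        | [] => intro y hy; cases hy
        | d :: ds =>
          have hdrop : rest.dropWhile p = d :: ds := hdw.symm
          have hpd : p d = false := pvDropHeadFalse p rest d ds hdrop
          have hd_mem : d ∈ rest := h_dw_sub.subset (List.mem_cons_self)
          have hd_ne : pvPre d ≠ pvPre k := by
            rw [hp'] at hpd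
            exact fun e => by simp [e] at hpd
          have hk_lt_d : pvPre k < pvPre d :=
            lt_of_le_of_ne (pvPre_mono (hk_le d hd_mem)) (Ne.symm hd_ne)
          intro y hy
          rcases List.mem_cons.mp hy with rfl | hy'
          · exact hk_lt_d
          · have hd_le_y : d ≤ y := (List.pairwise_cons.mp h_dw_pw).1 y hy'
            exact lt_of_lt_of_le hk_lt_d (pvPre_mono hd_le_y)
      have h_rest_eq : rest = tw ++ dw := by
        rw [htw, hdw, List.takeWhile_append_dropWhile]
      have h_dedup : PySem.List.dedup ((k :: rest).map pvPre)
          = pvPre k :: PySem.List.dedup (dw.map pvPre) := by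
        rw [show (k :: rest).map pvPre = pvPre k :: (tw.map pvPre ++ dw.map pvPre) by
          rw [h_rest_eq]; simp]
        refine pvDedupConsEq _ _ _ ?_ ?_
        · intro j hj
          obtain ⟨x, hx, rfl⟩ := List.mem_map.mp hj
          exact h_tw_eq x hx
        · intro hmem
          obtain ⟨y, hy, he⟩ := List.mem_map.mp hmem
          exact (h_dw_lt y hy).ne' he
      have h_filt_tw : tw.filter (fun j => pvPre j == pvPre k) = tw :=
        List.filter_eq_self.mpr (fun j hj => by rw [h_tw_eq j hj]; simp)
      have h_filt_dw : dw.filter (fun j => pvPre j == pvPre k) = [] :=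
        List.filter_eq_nil_iff.mpr (fun y hy => by simp [(h_dw_lt y hy).ne'])
      have h_filt_k : (k :: rest).filter (fun j => pvPre j == pvPre k) = k :: tw := by
        rw [h_rest_eq, List.filter_cons, List.filter_append, h_filt_tw, h_filt_dw]
        simp
      have h_filt_s : ∀ s ∈ PySem.List.dedup (dw.map pvPre),
          (k :: rest).filter (fun j => pvPre j == s) = dw.filter (fun j => pvPre j == s) := by
        intro s hs
        obtain ⟨y0, hy0, rfl⟩ := List.mem_map.mp ((PySem.List.mem_dedup _ _).mp hs)
        have hks : pvPre k ≠ pvPre y0 := (h_dw_lt y0 hy0).ne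
        have h_tw_nil : tw.filter (fun j => pvPre j == pvPre y0) = [] :=
          List.filter_eq_nil_iff.mpr (fun j hj => by
            rw [h_tw_eq j hj]; simp [hks])
        rw [h_rest_eq, List.filter_cons, List.filter_append, h_tw_nil]
        simp [hks]
      have h_parts : pvGroupbyParts cards (k :: rest)
          = (pvHdr (pvPre k) :: ((k :: tw).map (pvLine cards) ++ ["\n"]))
              ++ pvGroupbyParts cards dw := by
        rw [pvGroupbyParts]
        rfl
      have h_dw_len : dw.length ≤ m := by
        have h1 : dw.length ≤ rest.length := h_dw_sub.length_le
        have h2 : rest.length ≤ m := by simpa using hlen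
        omega
      have hIH := ih dw h_dw_len h_dw_pw
      rw [h_dedup, List.foldl_cons]
      rw [PySem.List.foldl_congr_mem (PySem.List.dedup (dw.map pvPre)) _
        (fun acc s =>
          (List.foldl (fun a k => a ++ pvLine cards k) (acc ++ pvHdr s)
            (dw.filter (fun j => pvPre j == s))) ++ "\n") _
        (by
          intro a s hs
          rw [h_filt_s s hs])]
      rw [hIH]
      rw [h_filt_k, pvFoldlLine, h_parts, pvSJoinAppend, pvSJoinCons, pvSJoinAppend, pvSJoinCons, pvSJoinNil]
      simp [String.append_assoc]

-- ===== VERDICT (by name: the statement is the Claim_ definition above) =====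
theorem pvFiltPairwise (l : List String) (hl : l.Pairwise (· ≤ ·)) (q : String → Bool) :
    PySem.List.sorted (l.filter q) (fun x => x) false = l.filter q :=
  PySem.List.sorted_eq_self_of_pairwise _ _
    (List.Pairwise.sublist List.filter_sublist hl)

theorem pvDedupMapPairwise (l : List String) (hl : l.Pairwise (· ≤ ·)) :
    PySem.List.sorted (PySem.List.dedup (l.map pvPre)) (fun x => x) false
      = PySem.List.dedup (l.map pvPre) := by
  apply PySem.List.sorted_eq_self_of_pairwise
  apply List.Pairwise.sublist (pvDedupSublist _)
  exact List.Pairwise.map pvPre (fun a b h => pvPre_mono h) hl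

theorem create_card_index_spec : Claim_equal_create_card_index := by
  intro cards _
  unfold Spec_create_card_index
  show (PySem.List.sorted
      ((PySem.List.sorted (PySem.List.dedup (cards.map Prod.fst)) (fun x => x) false).foldl
        (fun g k => g.modify (pvPre k) [] (fun xs => xs ++ [k])) PySem.Dict.empty).keys
      (fun x => x) false).foldl
    (fun acc series =>
      (PySem.List.sorted
          (((PySem.List.sorted (PySem.List.dedup (cards.map Prod.fst)) (fun x => x) false).foldl
              (fun g k => g.modify (pvPre k) [] (fun xs => xs ++ [k])) PySem.Dict.empty).getD series [])
          (fun x => x) false).foldl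
        (fun a cid =>
          a ++ "- [" ++ cid ++ "](cards/" ++ cid ++ ".md) - "
            ++ (PySem.Dict.mk (((PySem.Dict.mk cards).get? cid).getD [])).getD "title" "Unknown" ++ "\n")
        (acc ++ "### " ++ series ++ " Series\n\n") ++ "\n")
    pvHeader
    = PySem.Str.join ""
        (pvHeader :: pvGroupbyParts cards
          (PySem.List.sorted (PySem.List.dedup (cards.map Prod.fst)) (fun x => x) false))
  set l := PySem.List.sorted (PySem.List.dedup (cards.map Prod.fst)) (fun x => x) false with hldef
  have hl : l.Pairwise (· ≤ ·) := by
    have := PySem.List.sorted_pairwise (PySem.List.dedup (cards.map Prod.fst)) (fun x => x)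
    simpa [hldef] using this
  rw [pvGroupsKeys l, pvDedupMapPairwise l hl]
  rw [PySem.List.foldl_congr_mem _ _
    (fun acc s =>
      (List.foldl (fun a k => a ++ pvLine cards k) (acc ++ pvHdr s)
        (l.filter (fun k => pvPre k == s))) ++ "\n") _
    (by
      intro acc s _
      rw [pvGroupsGetD l s, pvFiltPairwise l hl]
      rw [show acc ++ "### " ++ s ++ " Series\n\n" = acc ++ pvHdr s by
        simp [pvHdr, String.append_assoc]]
      rw [PySem.List.foldl_congr_mem _ _
        (fun a k => a ++ pvLine cards k) _
        (by intro a k _; simp [pvLine, String.append_assoc])])]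
  rw [pvMain cards l.length l le_rfl hl pvHeader, pvSJoinCons]
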